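-- pv_equiv track=rewrite | github.com/yeezy-na-izi/school | kb/qwe.py | shfr
-- ===== SOURCE A (Python) =====
-- def shfr(n):
--     st = ""
--     k = ""
--     for i in n:
--         st += '0' + bin(ord(i))[2::]
--     st += '0' * (15 - len(st) % 15)
--     for i in range(0, len(st), 15):
--         k += (chr(int(st[i:i + 15], 2)))
--     return k
-- ===== SOURCE B (Python) =====
-- def shfr(n):
--     # single pass: integer bit-buffer instead of building a huge '0'/'1' string
--     buf = 0
--     cnt = 0
--     for c in n:
--         w = ord(c).bit_length() + 1
--         buf = (buf << w) + ord(c)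
--         cnt += w
--     p = 15 - cnt % 15
--     buf <<= p
--     cnt += p
--     return ''.join(chr((buf >> (cnt - 15 * k)) % 32768) for k in range(1, cnt // 15 + 1))
-- ===== Notes on version B (the rewrite author's own statement) =====
-- stated objective: alternative
-- what changed: Replaces the intermediate binary-digit text string and per-chunk string-to-int parsing by a single integer bit-buffer with a bit counter, extracting the 15-bit code units by shifts and mod from the most-significant end.
import Mathlib
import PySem

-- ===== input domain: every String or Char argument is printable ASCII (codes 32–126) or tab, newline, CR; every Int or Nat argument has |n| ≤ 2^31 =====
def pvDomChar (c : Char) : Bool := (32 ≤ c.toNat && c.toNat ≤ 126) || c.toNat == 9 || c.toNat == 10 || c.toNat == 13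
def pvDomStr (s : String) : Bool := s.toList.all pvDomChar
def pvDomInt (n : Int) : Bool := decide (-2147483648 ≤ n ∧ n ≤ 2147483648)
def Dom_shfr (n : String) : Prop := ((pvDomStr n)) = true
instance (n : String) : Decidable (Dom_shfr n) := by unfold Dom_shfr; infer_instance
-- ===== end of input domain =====

-- B replaces A's intermediate binary-digit text string by an integer bit-buffer; return values proved equal, no speed claim (B is slower on large inputs).

-- ===== PORT A =====
-- bin(m)[2:] for m > 0 (digits of m, MSB first, no leading zeros)
def binRec (m : Nat) : List Char :=
  if h : m = 0 then [] else binRec (m / 2) ++ [if m % 2 = 1 then '1' else '0']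
decreasing_by exact Nat.div_lt_self (Nat.pos_of_ne_zero h) one_lt_two

-- bin(m)[2:] including Python's bin(0)[2:] = "0"
def binA (m : Nat) : List Char := if m = 0 then ['0'] else binRec m

-- int(s, 2) on a string of '0'/'1' digits
def parseBin (s : List Char) : Nat :=
  s.foldl (fun a c => 2 * a + (if c = '1' then 1 else 0)) 0

-- for i in range(0, len(st), 15): k += chr(int(st[i:i+15], 2))
def loopA (st : List Char) (i : Nat) : List Char :=
  if h : i < st.length then
    Char.ofNat (parseBin ((st.drop i).take 15)) :: loopA st (i + 15)
  else []
termination_by st.length - i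
decreasing_by omega

def shfr (n : String) : String :=
  let st := n.toList.foldl (fun st c => st ++ ('0' :: binA c.toNat)) []
  let st := st ++ List.replicate (15 - st.length % 15) '0'
  String.mk (loopA st 0)

-- ===== PORT B =====
-- ord(c).bit_length()
def bitLen (m : Nat) : Nat :=
  if h : m = 0 then 0 else bitLen (m / 2) + 1
decreasing_by exact Nat.div_lt_self (Nat.pos_of_ne_zero h) one_lt_two

def shfr_alt (n : String) : String :=
  let bc := n.toList.foldl (fun (bc : Nat × Nat) c =>
      let w := bitLen c.toNat + 1
      (bc.1 <<< w + c.toNat, bc.2 + w)) (0, 0)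
  let p := 15 - bc.2 % 15
  let buf := bc.1 <<< p
  let cnt := bc.2 + p
  String.mk ((List.range (cnt / 15)).map
    (fun k => Char.ofNat ((buf >>> (cnt - 15 * (k + 1))) % 32768)))

-- ===== PRECONDITION & SPEC =====
def Spec_shfr (n : String) (out : String) : Prop := out = shfr_alt n
instance (n : String) (out : String) : Decidable (Spec_shfr n out) := by unfold Spec_shfr; infer_instance

-- ===== CLAIM (what is proved, stated in full; the proofs are below) =====
def Claim_equal_shfr : Prop := ∀ (n : String), Dom_shfr n → Spec_shfr n (shfr n)

-- ===== LEMMAS AND PROOFS =====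

theorem parseBin_foldl (s : List Char) (a : Nat) :
    s.foldl (fun a c => 2 * a + (if c = '1' then 1 else 0)) a
      = a * 2 ^ s.length + parseBin s := by
  induction s generalizing a with
  | nil => simp [parseBin]
  | cons c s ih =>
    have hc : parseBin (c :: s) = (if c = '1' then 1 else 0) * 2 ^ s.length + parseBin s := by
      have h := ih (2 * 0 + if c = '1' then 1 else 0)
      simpa [parseBin, List.foldl_cons] using h
    simp only [List.foldl_cons, List.length_cons]
    rw [ih, hc]
    ring

theorem parseBin_append (xs ys : List Char) :
    parseBin (xs ++ ys) = parseBin xs * 2 ^ ys.length + parseBin ys := by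
  rw [parseBin, List.foldl_append, ← parseBin, parseBin_foldl]

theorem parseBin_cons (c : Char) (s : List Char) :
    parseBin (c :: s) = (if c = '1' then 1 else 0) * 2 ^ s.length + parseBin s := by
  have h := parseBin_foldl s (2 * 0 + if c = '1' then 1 else 0)
  simpa [parseBin, List.foldl_cons] using h

theorem parseBin_lt (s : List Char) : parseBin s < 2 ^ s.length := by
  induction s with
  | nil => simp [parseBin]
  | cons c s ih =>
    rw [parseBin_cons]
    have hd : (if c = '1' then 1 else 0) ≤ 1 := by split <;> omega
    simp only [List.length_cons, pow_succ]
    nlinarith [ih]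

theorem parseBin_replicate (p : Nat) : parseBin (List.replicate p '0') = 0 := by
  induction p with
  | zero => simp [parseBin]
  | succ p ih =>
    rw [List.replicate_succ, parseBin_cons, ih]; simp

theorem binRec_spec (m : Nat) :
    parseBin (binRec m) = m ∧ (binRec m).length = bitLen m := by
  induction m using Nat.strong_induction_on with
  | _ m ih =>
    by_cases h : m = 0
    · subst h; simp [binRec, bitLen, parseBin]
    · have hlt : m / 2 < m := Nat.div_lt_self (Nat.pos_of_ne_zero h) one_lt_two
      obtain ⟨h1, h2⟩ := ih _ hlt
      rw [binRec, bitLen]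
      simp only [h, dif_neg, not_false_iff]
      constructor
      · rw [parseBin_append, h1]
        have hd : parseBin [if m % 2 = 1 then '1' else '0'] = m % 2 := by
          rcases Nat.mod_two_eq_zero_or_one m with h' | h' <;> simp [h', parseBin]
        rw [hd]
        simp only [List.length_singleton, pow_one]
        omega
      · simp [h2]

theorem binA_spec (m : Nat) :
    parseBin (binA m) = m ∧ (binA m).length = max 1 (bitLen m) := by
  by_cases h : m = 0
  · subst h; simp [binA, bitLen, parseBin]
  · have hb : 1 ≤ bitLen m := by rw [bitLen]; simp [h]
    simp [binA, h, (binRec_spec m).1, (binRec_spec m).2, Nat.max_eq_right hb]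

-- per-character encoding used by A
def enc (c : Char) : List Char := '0' :: binA c.toNat

theorem enc_val (c : Char) : parseBin (enc c) = c.toNat := by
  rw [enc, parseBin_cons, (binA_spec c.toNat).1]; simp

theorem enc_len (c : Char) (hc : c.toNat ≠ 0) : (enc c).length = bitLen c.toNat + 1 := by
  have hb : 1 ≤ bitLen c.toNat := by rw [bitLen]; simp [hc]
  rw [enc, List.length_cons, (binA_spec c.toNat).2, Nat.max_eq_right hb]

-- B's fold computes (parseBin st, st.length) of A's fold result
theorem fold_corr (l : List Char) (hl : ∀ c ∈ l, c.toNat ≠ 0) (st : List Char) :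
    l.foldl (fun (bc : Nat × Nat) c =>
        let w := bitLen c.toNat + 1
        (bc.1 <<< w + c.toNat, bc.2 + w)) (parseBin st, st.length)
      = (parseBin (l.foldl (fun st c => st ++ enc c) st),
         (l.foldl (fun st c => st ++ enc c) st).length) := by
  induction l generalizing st with
  | nil => simp
  | cons c l ih =>
    have hc : c.toNat ≠ 0 := hl c (by simp)
    have h1 : parseBin st <<< (bitLen c.toNat + 1) + c.toNat = parseBin (st ++ enc c) := by
      rw [parseBin_append, enc_val, enc_len c hc, Nat.shiftLeft_eq]
    have h2 : st.length + (bitLen c.toNat + 1) = (st ++ enc c).length := by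
      rw [List.length_append, enc_len c hc]
    simp only [List.foldl_cons]
    rw [h1, h2]
    exact ih (fun c hm => hl c (by simp [hm])) (st ++ enc c)

theorem loopA_shift : ∀ (st : List Char) (i : Nat),
    loopA st (i + 15) = loopA (st.drop 15) i
  | st, i => by
    conv_lhs => rw [loopA]
    conv_rhs => rw [loopA]
    have hlen : (st.drop 15).length = st.length - 15 := by simp
    by_cases h : i + 15 < st.length
    · have h' : i < (st.drop 15).length := by omega
      rw [dif_pos h, dif_pos h', List.drop_drop, Nat.add_comm 15 i, loopA_shift st (i + 15)]
    · have h' : ¬ i < (st.drop 15).length := by omega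
      rw [dif_neg h, dif_neg h']
termination_by st i => st.length - i
decreasing_by omega

-- the extraction loops agree
theorem extract_corr (g : Nat) (st : List Char) (hlen : st.length = 15 * g) :
    loopA st 0 = (List.range g).map
      (fun k => Char.ofNat ((parseBin st >>> (15 * g - 15 * (k + 1))) % 32768)) := by
  induction g generalizing st with
  | zero =>
    simp only [List.range_zero, List.map_nil]
    rw [loopA]
    simp [hlen]
  | succ g ih =>
    have hpos : 0 < st.length := by omega
    have hdl : (st.drop 15).length = 15 * g := by simp; omega
    have htl : (st.take 15).length = 15 := by simp; omega
    have hval : parseBin st = parseBin (st.take 15) * 2 ^ (15 * g) + parseBin (st.drop 15) := by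
      conv_lhs => rw [← List.take_append_drop 15 st]
      rw [parseBin_append, hdl]
    have hRlt : parseBin (st.drop 15) < 2 ^ (15 * g) := by
      have h := parseBin_lt (st.drop 15); rwa [hdl] at h
    have hClt : parseBin (st.take 15) < 2 ^ 15 := by
      have h := parseBin_lt (st.take 15); rwa [htl] at h
    rw [loopA, dif_pos hpos, loopA_shift st 0, ih (st.drop 15) hdl,
      List.range_succ_eq_map, List.map_cons, List.map_map]
    congr 1
    · -- head: chr of first 15 bits
      have hsh : parseBin st >>> (15 * (g + 1) - 15 * (0 + 1)) = parseBin (st.take 15) := by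
        rw [Nat.shiftRight_eq_div_pow, hval,
          show 15 * (g + 1) - 15 * (0 + 1) = 15 * g by omega,
          Nat.add_comm, Nat.add_mul_div_right _ _ (Nat.two_pow_pos _),
          Nat.div_eq_of_lt hRlt, Nat.zero_add]
      rw [hsh, Nat.mod_eq_of_lt (by omega : parseBin (st.take 15) < 32768)]
      simp
    · -- tail: remaining groups read the low bits only
      apply List.map_congr_left
      intro k hk
      have hkg : k < g := List.mem_range.mp hk
      simp only [Function.comp_apply, Nat.succ_eq_add_one]
      congr 1
      rw [show 15 * (g + 1) - 15 * (k + 1 + 1) = 15 * g - 15 * (k + 1) by omega]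
      set s := 15 * g - 15 * (k + 1) with hs
      have hsle : s + 15 ≤ 15 * g := by omega
      rw [Nat.shiftRight_eq_div_pow, Nat.shiftRight_eq_div_pow, hval,
        show parseBin (st.take 15) * 2 ^ (15 * g)
            = (parseBin (st.take 15) * 2 ^ (15 * g - s - 15) * 2 ^ 15) * 2 ^ s by
          rw [mul_assoc, mul_assoc, ← pow_add, ← pow_add]; congr 2; omega,
        Nat.add_comm, Nat.add_mul_div_right _ _ (Nat.two_pow_pos _),
        show (32768 : Nat) = 2 ^ 15 by norm_num,
        Nat.add_mul_mod_self_right]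

theorem shfr_spec' (n : String) (hd : Dom_shfr n) : shfr n = shfr_alt n := by
  have hch : ∀ c ∈ n.toList, c.toNat ≠ 0 := by
    intro c hc
    have h := List.all_eq_true.mp hd c hc
    simp only [pvDomChar, Bool.or_eq_true, Bool.and_eq_true, decide_eq_true_eq,
      beq_iff_eq] at h
    omega
  simp only [shfr, shfr_alt]
  rw [show (fun (st : List Char) c => st ++ ('0' :: binA c.toNat))
      = (fun st c => st ++ enc c) from rfl]
  have hfc := fold_corr n.toList hch []
  simp only [show parseBin [] = 0 from rfl, List.length_nil] at hfc
  rw [hfc]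
  set st0 := n.toList.foldl (fun st c => st ++ enc c) [] with hst0
  set p := 15 - st0.length % 15 with hp
  set st1 := st0 ++ List.replicate p '0' with hst1
  have hlen1 : st1.length = st0.length + p := by simp [hst1]
  have hmod : st0.length % 15 < 15 := Nat.mod_lt _ (by norm_num)
  have hdiv : st1.length % 15 = 0 := by rw [hlen1, hp]; omega
  have hval1 : parseBin st1 = parseBin st0 <<< p := by
    rw [hst1, parseBin_append, parseBin_replicate, List.length_replicate,
      Nat.shiftLeft_eq]
    omega
  have hg : st1.length = 15 * (st1.length / 15) := by omega
  rw [extract_corr (st1.length / 15) st1 hg, ← hval1, ← hlen1, ← hg]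

-- ===== VERDICT (by name: the statement is the Claim_ definition above) =====
theorem shfr_spec : Claim_equal_shfr := by
  intro n hd
  unfold Spec_shfr
  exact shfr_spec' n hd
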